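-- pv_equiv track=rewrite | github.com/c0ntradicti0n/listalign | listalign/helpers.py | str_in_list_at
-- ===== SOURCE A (Python) =====
-- from typing import List
--
-- sign = lambda x: -1 if x < 0 else (1 if x > 0 else 0)
--
-- def str_in_list_at(sl: List[str], pos: int, pos_str_start: int = 0, pos_str_end: int = 0, span: int = 4) -> str:
--     """
--     From a list of strings return the string before or after, given the positions
--
--
--     >>> str_in_list_at("abc def gef hij".split(), 0, span = 3)
--     'abc'
--
--
--     >>> str_in_list_at("abc def gef hij".split(), 1, pos_str_end = 2, span = 6)
--     'gefhij'
--
--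
--     >>> str_in_list_at("abc def gef hij".split(), 2, pos_str_start = 2, span = -6)
--     'cdefge'
--
--
--     >>> str_in_list_at("abc def gef hij".split(), 1, pos_str_start = 2, span = 6)
--     'fgefhi'
--
--     >>> str_in_list_at("abc def gef hij".split(), 2, pos_str_end = 2, span = -6)
--     'defgef'
--
--
--     >>> str_in_list_at("abc def gef hij".split(), 2, span = -3)
--     'def'
--
--     >>> str_in_list_at("abc def gef hij".split(), 0, span = -3)
--     ''
--
--
--     >>> str_in_list_at("abc def gef hij".split(), 3, span = 3)
--     'hij'
--
--
--     >>> str_in_list_at("abc def gef hij".split(), 2, span = 3)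
--     'gef'
--
--     >>> str_in_list_at("abc def gef hij".split(), 1, span = 6)
--     'defgef'
--
--
--
--
--     if the requested range is shorter, the result is also shorter as with the "abc"[:10] syntax, that
--     gives "abc"
--
--
--     """
--     fb = sign(span)
--     if fb == 0:
--         return ""
--
--     if pos_str_start == 0 and pos_str_end == 0:
--         r = ""
--     if pos_str_start > 0:
--         r = (sl[pos][:pos_str_start] if fb < 0 else sl[pos][pos_str_start:])
--     if pos_str_end > 0:
--         r = (sl[pos][:pos_str_end + 1] if fb < 0 else sl[pos][pos_str_end + 1:])
--
--     pos_new = pos + ((1 if pos_str_end or pos_str_start else 0) if fb > 0 else -1)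
--     span_len = abs(span)
--
--     while True:
--         if pos_new < 0 or pos_new >= len(sl):
--             return r
--
--         if fb > 0:
--             r = r + sl[pos_new][:span]
--
--             if len(r) >= span_len:
--                 return r[:span]
--             else:
--                 pos_new += 1
--
--         elif fb < 0:
--             r = sl[pos_new][span:] + r
--
--             if len(r) >= span_len:
--                 return r[span:]
--             else:
--                 pos_new -= 1
-- ===== SOURCE B (Python) =====
-- def str_in_list_at(sl, pos, pos_str_start=0, pos_str_end=0, span=4):
--     # Build-then-slice re-implementation: gather the partial word plus all
--     # neighbouring words in one join, then cut once with a single slice.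
--     if span == 0:
--         return ""
--     forward = span > 0
--     if pos_str_end > 0:
--         r = sl[pos][pos_str_end + 1:] if forward else sl[pos][:pos_str_end + 1]
--     elif pos_str_start > 0:
--         r = sl[pos][pos_str_start:] if forward else sl[pos][:pos_str_start]
--     else:
--         r = ""
--     start = pos + (1 if (pos_str_start or pos_str_end) else 0) if forward else pos - 1
--     if start < 0 or start >= len(sl):
--         return r
--     if forward:
--         return (r + "".join(sl[start:]))[:span]
--     else:
--         return ("".join(sl[:start + 1]) + r)[span:]
-- ===== Notes on version B (the rewrite author's own statement) =====
-- stated objective: alternative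
-- what changed: A accumulates neighbouring words one at a time in a while-loop that truncates each word and stops as soon as enough characters are collected; B gathers the partial word plus all neighbouring words with a single join and cuts the result once with one slice ([:span] forward, [span:] backward).
import Mathlib
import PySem

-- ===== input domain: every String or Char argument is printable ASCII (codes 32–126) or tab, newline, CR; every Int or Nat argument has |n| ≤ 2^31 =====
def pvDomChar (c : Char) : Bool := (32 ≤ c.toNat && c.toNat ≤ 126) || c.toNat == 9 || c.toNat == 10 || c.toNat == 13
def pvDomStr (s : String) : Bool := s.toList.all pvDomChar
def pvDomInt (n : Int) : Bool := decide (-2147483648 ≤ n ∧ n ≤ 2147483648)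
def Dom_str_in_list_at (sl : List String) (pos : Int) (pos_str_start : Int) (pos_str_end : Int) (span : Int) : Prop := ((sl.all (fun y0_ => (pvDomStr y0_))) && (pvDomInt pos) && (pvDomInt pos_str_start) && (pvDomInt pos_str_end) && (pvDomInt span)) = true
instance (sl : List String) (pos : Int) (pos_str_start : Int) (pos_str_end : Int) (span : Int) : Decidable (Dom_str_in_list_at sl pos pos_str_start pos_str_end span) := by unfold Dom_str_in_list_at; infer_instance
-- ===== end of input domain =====

-- B replaces A's accumulate-until-enough while-loop by one join of the neighbouring
-- words followed by a single slice (alternative decomposition; not claimed faster).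


-- ===== PORT A =====
-- sign = lambda x: -1 if x < 0 else (1 if x > 0 else 0)
def pvSign (x : Int) : Int := if x < 0 then -1 else if 0 < x then 1 else 0

-- A's 'while True' loop for fb > 0 (pos_new only moves right, so the loop splits by the
-- loop-invariant sign of fb).  sl[pos_new] is in range whenever read, so .getD "" is exact.
def pvLoopF (sl : List String) (span : Int) (r : String) (p : Int) : String :=
  if p < 0 ∨ (sl.length : Int) ≤ p then r
  else
    let r' := r ++ PySem.Str.slice ((PySem.List.pyGet? sl p).getD "") none (some span)
    if span.natAbs ≤ PySem.Str.len r' then PySem.Str.slice r' none (some span)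
    else pvLoopF sl span r' (p + 1)
termination_by (sl.length - p).toNat
decreasing_by simp at *; omega

-- A's 'while True' loop for fb < 0 (pos_new only moves left).
def pvLoopB (sl : List String) (span : Int) (r : String) (p : Int) : String :=
  if p < 0 ∨ (sl.length : Int) ≤ p then r
  else
    let r' := PySem.Str.slice ((PySem.List.pyGet? sl p).getD "") (some span) none ++ r
    if span.natAbs ≤ PySem.Str.len r' then PySem.Str.slice r' (some span) none
    else pvLoopB sl span r' (p - 1)
termination_by (p + 1).toNat
decreasing_by simp at *; omega

def str_in_list_at (sl : List String) (pos : Int) (pos_str_start : Int) (pos_str_end : Int) (span : Int) : String :=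
  let fb := pvSign span
  if fb = 0 then ""
  else
    -- sl[pos]: Python raises IndexError when pos is out of range and a branch below reads it;
    -- those inputs are outside Pre_, so the total default "" is exact on Pre_.
    let w := (PySem.List.pyGet? sl pos).getD ""
    -- Python assigns r in sequence (both-zero, then start>0, then end>0 overwrites); when no
    -- branch fires Python raises UnboundLocalError — outside Pre_ — so r0 = "" is a total default.
    let r0 : String := ""
    let r1 := if 0 < pos_str_start then
        (if fb < 0 then PySem.Str.slice w none (some pos_str_start)
         else PySem.Str.slice w (some pos_str_start) none) else r0
    let r2 := if 0 < pos_str_end then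
        (if fb < 0 then PySem.Str.slice w none (some (pos_str_end + 1))
         else PySem.Str.slice w (some (pos_str_end + 1)) none) else r1
    let pos_new := pos + (if 0 < fb then (if pos_str_end ≠ 0 ∨ pos_str_start ≠ 0 then 1 else 0) else -1)
    if 0 < fb then pvLoopF sl span r2 pos_new else pvLoopB sl span r2 pos_new

-- ===== PORT B =====
def str_in_list_at_alt (sl : List String) (pos : Int) (pos_str_start : Int) (pos_str_end : Int) (span : Int) : String :=
  if span = 0 then ""
  else
    let forward := decide (0 < span)
    -- sl[pos]; as in port A, out-of-range pos (IndexError in both Pythons) is outside Pre_.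
    let w := (PySem.List.pyGet? sl pos).getD ""
    let r := if 0 < pos_str_end then
        (if forward then PySem.Str.slice w (some (pos_str_end + 1)) none
         else PySem.Str.slice w none (some (pos_str_end + 1)))
      else if 0 < pos_str_start then
        (if forward then PySem.Str.slice w (some pos_str_start) none
         else PySem.Str.slice w none (some pos_str_start))
      else ""
    let start := if forward then pos + (if pos_str_start ≠ 0 ∨ pos_str_end ≠ 0 then 1 else 0) else pos - 1
    if start < 0 ∨ (sl.length : Int) ≤ start then r
    else if forward then
      PySem.Str.slice (r ++ PySem.Str.join "" (PySem.List.slice sl (some start) none)) none (some span)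
    else
      PySem.Str.slice (PySem.Str.join "" (PySem.List.slice sl none (some (start + 1))) ++ r) (some span) none

-- ===== PRECONDITION & SPEC =====
-- Pre_ excludes exactly the inputs where Python A raises: UnboundLocalError when span ≠ 0 and
-- neither offset is positive but one is negative (r never assigned), and IndexError when a
-- positive offset makes A read sl[pos] with pos out of Python's (negative-wrapping) range.
def Pre_str_in_list_at (sl : List String) (pos : Int) (pos_str_start : Int) (pos_str_end : Int) (span : Int) : Prop :=
  span = 0 ∨ (pos_str_start = 0 ∧ pos_str_end = 0) ∨
    ((0 < pos_str_start ∨ 0 < pos_str_end) ∧ -(sl.length : Int) ≤ pos ∧ pos < sl.length)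
instance (sl : List String) (pos : Int) (pos_str_start : Int) (pos_str_end : Int) (span : Int) : Decidable (Pre_str_in_list_at sl pos pos_str_start pos_str_end span) := by unfold Pre_str_in_list_at; infer_instance
def pvWitness_str_in_list_at : List String × Int × Int × Int × Int := (["abc", "def", "gef", "hij"], 1, 0, 2, 6)

def Spec_str_in_list_at (sl : List String) (pos : Int) (pos_str_start : Int) (pos_str_end : Int) (span : Int) (out : String) : Prop := out = str_in_list_at_alt sl pos pos_str_start pos_str_end span
instance (sl : List String) (pos : Int) (pos_str_start : Int) (pos_str_end : Int) (span : Int) (out : String) : Decidable (Spec_str_in_list_at sl pos pos_str_start pos_str_end span out) := by unfold Spec_str_in_list_at; infer_instance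

-- ===== CLAIM (what is proved, stated in full; the proofs are below) =====
def Claim_equal_str_in_list_at : Prop := ∀ (sl : List String) (pos : Int) (pos_str_start : Int) (pos_str_end : Int) (span : Int), Dom_str_in_list_at sl pos pos_str_start pos_str_end span → Pre_str_in_list_at sl pos pos_str_start pos_str_end span → Spec_str_in_list_at sl pos pos_str_start pos_str_end span (str_in_list_at sl pos pos_str_start pos_str_end span)
-- ===== LEMMAS AND PROOFS =====

theorem pvTakeMid (a b c : List Char) (t : Nat) :
    ((a ++ b.take t) ++ c).take t = ((a ++ b) ++ c).take t := by
  simp only [List.append_assoc, List.take_append, List.take_take, List.length_take]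
  congr 1
  congr 1
  · congr 1; omega
  · congr 1; omega

theorem pvFwdLoop (sl : List String) (t : Nat) (ht : 0 < t) :
    ∀ (n k : Nat) (r : String), sl.length - k = n → k < sl.length →
      (pvLoopF sl (t : Int) r (k : Int)).toList
        = (r.toList ++ ((sl.drop k).map String.toList).flatten).take t := by
  intro n
  induction n with
  | zero => intro k r hn hk; omega
  | succ m ih =>
    intro k r hn hk
    rw [pvLoopF]
    have hg : ¬ ((k:Int) < 0 ∨ (sl.length : Int) ≤ (k:Int)) := by omega
    rw [if_neg hg]
    have hget : PySem.List.pyGet? sl (k:Int) = some sl[k] := by simp [pysem, hk]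
    rw [hget]
    simp only [Option.getD_some]
    have hw : (PySem.Str.slice sl[k] none (some (t:Int))).toList = sl[k].toList.take t := by
      simp [pysem]
    have hr' : (r ++ PySem.Str.slice sl[k] none (some (t:Int))).toList
        = r.toList ++ sl[k].toList.take t := by simp [hw]
    have hdrop : sl.drop k = sl[k] :: sl.drop (k + 1) := List.drop_eq_getElem_cons hk
    have hlen : r.toList.length = r.length := by simp
    have hlenw : sl[k].toList.length = sl[k].length := by simp
    rw [hdrop]
    simp only [List.map_cons, List.flatten_cons]
    split_ifs with hc
    · -- enough characters collected: both sides are the first t characters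
      have hcn : t ≤ r.length + min t sl[k].length := by
        have h2 : ((t:Int)) ≤ (r.length:Int) + min (t:Int) (sl[k].length:Int) := by
          simpa [hr'] using hc
        exact_mod_cast h2
      have hc' : t ≤ (r.toList ++ sl[k].toList.take t).length := by
        simp only [List.length_append, List.length_take, hlen, hlenw]
        omega
      have hL : (PySem.Str.slice (r ++ PySem.Str.slice sl[k] none (some (t:Int))) none (some (t:Int))).toList
          = (r.toList ++ sl[k].toList.take t).take t := by
        simp [pysem, hr']
      rw [hL, ← List.append_assoc, ← pvTakeMid r.toList sl[k].toList _ t,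
        List.take_append_of_le_length hc']
    · -- not enough yet: recurse (or fall off the right end)
      have hcn : r.length + min t sl[k].length < t := by
        have h2 : (r.length:Int) + min (t:Int) (sl[k].length:Int) < (t:Int) := by
          simpa [hr'] using hc
        exact_mod_cast h2
      by_cases hk1 : k + 1 < sl.length
      · have hcast : ((k:Int) + 1) = ((k+1 : Nat) : Int) := by omega
        rw [hcast, ih (k+1) _ (by omega) hk1, hr']
        rw [pvTakeMid]
        simp [List.append_assoc]
      · -- k was the last word
        have hkl : k + 1 = sl.length := by omega
        rw [pvLoopF, if_pos (by omega)]
        have hrest : sl.drop (k+1) = [] := by rw [hkl]; simp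
        have hlw : sl[k].toList.length < t := by rw [hlenw]; omega
        rw [hr', hrest]
        simp only [List.map_nil, List.flatten_nil, List.append_nil]
        rw [List.take_of_length_le (le_of_lt hlw),
          List.take_of_length_le (by simp only [List.length_append, hlen, hlenw]; omega)]

theorem pvSufRev (b : List Char) (t : Nat) : (b.drop (b.length - t)).reverse = b.reverse.take t := by
  rw [List.reverse_drop]
  by_cases h : t ≤ b.length
  · congr 1; omega
  · rw [List.take_of_length_le (by simp; omega), List.take_of_length_le (by simp; omega)]

theorem pvLastRev (X : List Char) (t : Nat) : X.drop (X.length - t) = (X.reverse.take t).reverse := by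
  rw [List.reverse_take]
  simp

theorem pvDropMid (a b c : List Char) (t : Nat) :
    ((a ++ b.drop (b.length - t)) ++ c).drop (((a ++ b.drop (b.length - t)) ++ c).length - t)
      = ((a ++ b) ++ c).drop (((a ++ b) ++ c).length - t) := by
  rw [pvLastRev ((a ++ b.drop (b.length - t)) ++ c), pvLastRev ((a ++ b) ++ c)]
  congr 1
  simp only [List.reverse_append, List.append_assoc]
  rw [pvSufRev]
  rw [← List.append_assoc, ← List.append_assoc, pvTakeMid]

theorem pvLastAppend (X Y : List Char) (t : Nat) (h : t ≤ Y.length) :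
    (X ++ Y).drop ((X ++ Y).length - t) = Y.drop (Y.length - t) := by
  rw [show (X ++ Y).length - t = X.length + (Y.length - t) by simp [List.length_append]; omega,
    List.drop_length_add_append]

theorem pvBwdStep (sl : List String) (t : Nat) (_ht : 0 < t) (k : Nat) (r : String)
    (hk : k < sl.length) :
    pvLoopB sl (-(t : Int)) r (k : Int)
      = (let r' := PySem.Str.slice sl[k] (some (-(t : Int))) none ++ r;
         if t ≤ PySem.Str.len r' then PySem.Str.slice r' (some (-(t : Int))) none
         else pvLoopB sl (-(t : Int)) r' ((k : Int) - 1)) := by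
  rw [pvLoopB, if_neg (by omega)]
  have hget : PySem.List.pyGet? sl (k : Int) = some sl[k] := by simp [pysem, hk]
  rw [hget]
  simp only [Option.getD_some, Int.natAbs_neg, Int.natAbs_natCast]

theorem pvStrLen (s : String) : PySem.Str.len s = s.toList.length := by simp [pysem]

theorem pvSliceNeg (w : String) (t : Nat) (ht : 0 < t) :
    (PySem.Str.slice w (some (-(t : Int))) none).toList = w.toList.drop (w.toList.length - t) := by
  simp only [pysem]
  rw [PySem.List.slice_from_neg_natCast _ _ ht]

theorem pvLastStop (F w rL : List Char) (t : Nat)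
    (h : t ≤ (w.drop (w.length - t) ++ rL).length) :
    (w.drop (w.length - t) ++ rL).drop ((w.drop (w.length - t) ++ rL).length - t)
      = ((F ++ w) ++ rL).drop (((F ++ w) ++ rL).length - t) := by
  rw [← pvLastAppend F (w.drop (w.length - t) ++ rL) t h, ← List.append_assoc, pvDropMid]

theorem pvLastRec (F w rL : List Char) (t : Nat) :
    (F ++ (w.drop (w.length - t) ++ rL)).drop ((F ++ (w.drop (w.length - t) ++ rL)).length - t)
      = ((F ++ w) ++ rL).drop (((F ++ w) ++ rL).length - t) := by
  rw [← List.append_assoc, pvDropMid]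

theorem pvBwdLoop (sl : List String) (t : Nat) (ht : 0 < t) :
    ∀ (k : Nat) (r : String), k < sl.length →
      (pvLoopB sl (-(t : Int)) r (k : Int)).toList
        = ((((sl.take (k + 1)).map String.toList).flatten ++ r.toList).drop
            ((((sl.take (k + 1)).map String.toList).flatten ++ r.toList).length - t)) := by
  intro k
  induction k with
  | zero =>
    intro r hk
    rw [pvBwdStep sl t ht 0 r hk]
    have hr' : (PySem.Str.slice sl[0] (some (-(t : Int))) none ++ r).toList
        = sl[0].toList.drop (sl[0].toList.length - t) ++ r.toList := by
      simp [pvSliceNeg _ _ ht]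
    have htake : sl.take (0 + 1) = [sl[0]] := by
      rw [List.take_succ_eq_append_getElem hk]; simp
    rw [htake]
    simp only [List.map_cons, List.map_nil, List.flatten_cons, List.flatten_nil, List.append_nil]
    split_ifs with hc
    · rw [pvStrLen, hr'] at hc
      rw [pvSliceNeg _ _ ht, hr']
      exact (pvLastStop [] sl[0].toList r.toList t (by exact_mod_cast hc)).trans (by simp)
    · rw [pvStrLen, hr'] at hc
      have hcn : ¬ t ≤ (sl[0].toList.drop (sl[0].toList.length - t) ++ r.toList).length := by
        exact_mod_cast hc
      simp only [not_le, List.length_append, List.length_drop] at hcn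
      rw [show ((0:Nat):Int) - 1 = (-1 : Int) by norm_num, pvLoopB, if_pos (by norm_num)]
      rw [hr']
      have hlw : sl[0].toList.length - t = 0 := by omega
      rw [hlw, List.drop_zero]
      rw [show (sl[0].toList ++ r.toList).length - t = 0 by
        simp only [List.length_append]; omega, List.drop_zero]
  | succ j ih =>
    intro r hk
    rw [pvBwdStep sl t ht (j+1) r hk]
    have hr' : (PySem.Str.slice sl[j+1] (some (-(t : Int))) none ++ r).toList
        = sl[j+1].toList.drop (sl[j+1].toList.length - t) ++ r.toList := by
      simp [pvSliceNeg _ _ ht]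
    have htake : sl.take (j + 1 + 1) = sl.take (j + 1) ++ [sl[j+1]] :=
      List.take_succ_eq_append_getElem hk
    rw [htake]
    simp only [List.map_append, List.map_cons, List.map_nil, List.flatten_append,
      List.flatten_cons, List.flatten_nil, List.append_nil]
    split_ifs with hc
    · rw [pvStrLen, hr'] at hc
      rw [pvSliceNeg _ _ ht, hr']
      exact pvLastStop (((sl.take (j+1)).map String.toList).flatten) sl[j+1].toList r.toList t (by exact_mod_cast hc)
    · rw [show ((j+1:Nat):Int) - 1 = ((j:Nat):Int) by omega]
      rw [ih _ (by omega), hr']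
      exact pvLastRec (((sl.take (j+1)).map String.toList).flatten) sl[j+1].toList r.toList t

theorem pvJoinNil (l : List (List Char)) : PySem.Chars.join [] l = l.flatten := by
  induction l with
  | nil => simp [PySem.Chars.join_nil]
  | cons x xs ih =>
    cases xs with
    | nil => simp [PySem.Chars.join_singleton]
    | cons y ys => rw [PySem.Chars.join_cons_cons, ih]; simp

-- ===== VERDICT (by name: the statement is the Claim_ definition above) =====
theorem str_in_list_at_spec : Claim_equal_str_in_list_at := by
  intro sl pos s e span _hdom _hpre
  unfold Spec_str_in_list_at str_in_list_at str_in_list_at_alt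
  by_cases h0 : span = 0
  · subst h0; simp [pvSign]
  rcases lt_trichotomy span 0 with hneg | hz | hpos
  · -- backward (span < 0): fb = -1
    have hfb : pvSign span = -1 := by unfold pvSign; rw [if_pos hneg]
    simp only [hfb, decide_eq_true_eq, if_neg h0, if_neg (by norm_num : ¬ (-1 : Int) = 0),
      if_neg (by omega : ¬ (0:Int) < -1), if_pos (by norm_num : (-1:Int) < 0),
      if_neg (by omega : ¬ 0 < span)]
    rw [show pos + -1 = pos - 1 by ring]
    set r := (if 0 < e then PySem.Str.slice ((PySem.List.pyGet? sl pos).getD "") none (some (e + 1))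
      else if 0 < s then PySem.Str.slice ((PySem.List.pyGet? sl pos).getD "") none (some s) else "") with hr
    set p := pos - 1 with hpdef
    by_cases hp : p < 0 ∨ (sl.length : Int) ≤ p
    · rw [if_pos hp, pvLoopB, if_pos hp]
    · rw [if_neg hp]
      have h1 : (0:Int) ≤ p := by omega
      have h2 : p < (sl.length : Int) := by omega
      have hk : p = ((p.toNat : Nat) : Int) := by omega
      have hkl : p.toNat < sl.length := by omega
      have hspan : span = -((span.natAbs : Nat) : Int) := by omega
      apply String.toList_inj.mp
      rw [hspan, hk]
      rw [pvBwdLoop sl span.natAbs (by omega) p.toNat r hkl]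
      rw [pvSliceNeg _ _ (by omega)]
      have hsl : PySem.List.slice sl none (some ((p.toNat : Int) + 1)) = sl.take (p.toNat + 1) := by
        have h := PySem.List.slice_to_natCast sl (p.toNat + 1)
        push_cast at h ⊢
        exact h
      rw [hsl]
      simp [PySem.Str.toList_join, pvJoinNil]
  · exact absurd hz h0
  · -- forward (0 < span): fb = 1
    have hfb : pvSign span = 1 := by unfold pvSign; rw [if_neg (by omega), if_pos hpos]
    simp only [hfb, decide_eq_true_eq, if_neg h0, if_neg (by norm_num : ¬ (1 : Int) = 0),
      if_pos (by norm_num : (0:Int) < 1), if_neg (by norm_num : ¬ (1:Int) < 0),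
      if_pos hpos]
    have hcond : (if s ≠ 0 ∨ e ≠ 0 then (1:Int) else 0) = (if e ≠ 0 ∨ s ≠ 0 then (1:Int) else 0) := by
      by_cases hse : s ≠ 0 ∨ e ≠ 0
      · rw [if_pos hse, if_pos (Or.symm hse)]
      · rw [if_neg hse, if_neg (fun h => hse (Or.symm h))]
    simp only [hcond]
    set r := (if 0 < e then PySem.Str.slice ((PySem.List.pyGet? sl pos).getD "") (some (e + 1)) none
      else if 0 < s then PySem.Str.slice ((PySem.List.pyGet? sl pos).getD "") (some s) none else "") with hr
    set p := pos + (if e ≠ 0 ∨ s ≠ 0 then (1:Int) else 0) with hpdef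
    by_cases hp : p < 0 ∨ (sl.length : Int) ≤ p
    · rw [if_pos hp, pvLoopF, if_pos hp]
    · rw [if_neg hp]
      have h1 : (0:Int) ≤ p := by omega
      have h2 : p < (sl.length : Int) := by omega
      have hk : p = ((p.toNat : Nat) : Int) := by omega
      have hkl : p.toNat < sl.length := by omega
      have hspan : span = ((span.toNat : Nat) : Int) := by omega
      apply String.toList_inj.mp
      rw [hspan, hk]
      rw [pvFwdLoop sl span.toNat (by omega) (sl.length - p.toNat) p.toNat r rfl hkl]
      rw [PySem.List.slice_from_natCast]
      simp [pysem, PySem.Str.toList_join, pvJoinNil]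
      rw [show max span 0 = span from by omega]
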